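-- pv_equiv track=rewrite | github.com/hermessc/clusteringAlgo | fnc.py | sortingHistograms
-- ===== SOURCE A (Python) =====
-- def sortingHistograms(normalized_histogram_x, normalized_histogram_y):
-- 	ordered_normalized_histogram_y = []
-- 	ordered_normalized_histogram_x = sorted(normalized_histogram_x)
-- 	for x in range(0,len(ordered_normalized_histogram_x),1):
-- 			for y in range(0, len(normalized_histogram_x),1):
-- 				if (normalized_histogram_x[y] == ordered_normalized_histogram_x[x]):
-- 					ordered_normalized_histogram_y.append(normalized_histogram_y[y])
-- 	return ordered_normalized_histogram_y
-- ===== SOURCE B (Python) =====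
-- def sortingHistograms(normalized_histogram_x, normalized_histogram_y):
-- 	# Group the y values by their x value once (indexing y by position, so a too-short
-- 	# y raises IndexError just like A), then emit each group per sorted x element.
-- 	groups = {}
-- 	for i, xv in enumerate(normalized_histogram_x):
-- 		groups.setdefault(xv, []).append(normalized_histogram_y[i])
-- 	out = []
-- 	for xv in sorted(normalized_histogram_x):
-- 		out.extend(groups.get(xv, []))
-- 	return out
-- ===== Notes on version B (the rewrite author's own statement) =====
-- stated objective: alternative
-- what changed: Replaces the nested full rescan of x for every sorted element by a single grouping pass building a dict of y-lists keyed by x value, then one dict lookup per sorted x element.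
import Mathlib
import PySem

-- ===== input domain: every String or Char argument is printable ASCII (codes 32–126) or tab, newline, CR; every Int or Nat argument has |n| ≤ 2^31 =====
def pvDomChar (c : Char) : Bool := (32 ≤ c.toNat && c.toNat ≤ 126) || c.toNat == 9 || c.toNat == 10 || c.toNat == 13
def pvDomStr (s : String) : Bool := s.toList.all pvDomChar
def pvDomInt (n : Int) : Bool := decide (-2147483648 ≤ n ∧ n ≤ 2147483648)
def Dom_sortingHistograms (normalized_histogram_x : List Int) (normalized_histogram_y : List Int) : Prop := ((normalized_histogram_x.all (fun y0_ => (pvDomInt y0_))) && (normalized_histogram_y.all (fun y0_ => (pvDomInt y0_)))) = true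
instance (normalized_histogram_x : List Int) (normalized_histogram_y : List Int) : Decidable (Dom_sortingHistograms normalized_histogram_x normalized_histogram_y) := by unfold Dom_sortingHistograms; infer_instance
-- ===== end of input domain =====

-- B replaces A's per-sorted-element rescans of x by one grouping pass over a dict plus one
-- lookup per sorted element (objective: alternative algorithm; same output, fewer scans).

-- ===== PORT A =====
-- literal transliteration of A: sort x, then for each sorted index rescan all of x,
-- appending the matching y values.
def sortingHistograms (normalized_histogram_x : List Int) (normalized_histogram_y : List Int) : List Int :=
  let ordered_x := PySem.List.sorted normalized_histogram_x (fun v => v) false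
  (PySem.List.pyRange 0 (ordered_x.length : Int) 1).foldl (fun acc x =>
    (PySem.List.pyRange 0 (normalized_histogram_x.length : Int) 1).foldl (fun acc2 y =>
      if PySem.List.pyGetD normalized_histogram_x y 0 = PySem.List.pyGetD ordered_x x 0 then
        acc2 ++ [PySem.List.pyGetD normalized_histogram_y y 0]
      else acc2) acc) []

-- ===== PORT B =====
-- transliteration of Source B: group y values by x value via enumerate + setdefault-append
-- (d.setdefault(k, []).append(v) = d.modify k [] (· ++ [v]); y[i] is in range on Pre_),
-- then extend with groups.get(xv, []) per sorted x element.
def sortingHistograms_alt (normalized_histogram_x : List Int) (normalized_histogram_y : List Int) : List Int :=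
  let groups : PySem.Dict Int (List Int) :=
    (PySem.List.enumerate normalized_histogram_x).foldl
      (fun d p => d.modify p.2 [] (· ++ [PySem.List.pyGetD normalized_histogram_y p.1 0]))
      PySem.Dict.empty
  (PySem.List.sorted normalized_histogram_x (fun v => v) false).foldl
    (fun out xv => out ++ groups.getD xv []) []

-- ===== PRECONDITION & SPEC =====
-- Pre_ excludes exactly the inputs where A raises IndexError (when x is longer than y,
-- every x index is eventually matched, so A indexes y out of range); B raises there too.
def Pre_sortingHistograms (normalized_histogram_x : List Int) (normalized_histogram_y : List Int) : Prop :=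
  normalized_histogram_x.length ≤ normalized_histogram_y.length
instance (normalized_histogram_x : List Int) (normalized_histogram_y : List Int) : Decidable (Pre_sortingHistograms normalized_histogram_x normalized_histogram_y) := by unfold Pre_sortingHistograms; infer_instance

def pvWitness_sortingHistograms : List Int × List Int := ([3, 1, 2, 1], [30, 10, 20, 11])

def Spec_sortingHistograms (normalized_histogram_x : List Int) (normalized_histogram_y : List Int) (out : List Int) : Prop := out = sortingHistograms_alt normalized_histogram_x normalized_histogram_y
instance (normalized_histogram_x : List Int) (normalized_histogram_y : List Int) (out : List Int) : Decidable (Spec_sortingHistograms normalized_histogram_x normalized_histogram_y out) := by unfold Spec_sortingHistograms; infer_instance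

-- ===== CLAIM (what is proved, stated in full; the proofs are below) =====
def Claim_equal_sortingHistograms : Prop := ∀ (normalized_histogram_x : List Int) (normalized_histogram_y : List Int), Dom_sortingHistograms normalized_histogram_x normalized_histogram_y → Pre_sortingHistograms normalized_histogram_x normalized_histogram_y → Spec_sortingHistograms normalized_histogram_x normalized_histogram_y (sortingHistograms normalized_histogram_x normalized_histogram_y)

-- ===== LEMMAS AND PROOFS =====

-- A's inner loop over indices equals a filter-map over the zipped pairs.
lemma inner_loop_eq (xs ys : List Int) (h : xs.length ≤ ys.length) (v : Int) (acc : List Int) :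
    (PySem.List.pyRange 0 (xs.length : Int) 1).foldl (fun acc2 y =>
      if PySem.List.pyGetD xs y 0 = v then
        acc2 ++ [PySem.List.pyGetD ys y 0]
      else acc2) acc
    = acc ++ ((xs.zip ys).filter (fun p => p.1 == v)).map (·.2) := by
  have hlen : (xs.zip ys).length = xs.length := by
    simp [List.length_zip]; omega
  have hcongr : (PySem.List.pyRange 0 (xs.length : Int) 1).foldl (fun acc2 y =>
      if PySem.List.pyGetD xs y 0 = v then
        acc2 ++ [PySem.List.pyGetD ys y 0]
      else acc2) acc
      = (PySem.List.pyRange 0 (((xs.zip ys).length : Nat) : Int) 1).foldl (fun acc2 j =>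
          (fun a (p : Int × Int) => if p.1 = v then a ++ [p.2] else a) acc2
            (PySem.List.pyGetD (xs.zip ys) j (0, 0))) acc := by
    rw [hlen]
    apply PySem.List.foldl_congr_mem
    intro a j hj
    rw [PySem.List.mem_pyRange_one] at hj
    have h0 : 0 ≤ j := hj.1
    have h1 : j.toNat < xs.length := by omega
    have h1' : j.toNat < ys.length := by omega
    have h1'' : j.toNat < (xs.zip ys).length := by omega
    rw [PySem.List.pyGetD_eq_getElem xs 0 h0 (by omega),
        PySem.List.pyGetD_eq_getElem ys 0 h0 (by omega),
        PySem.List.pyGetD_eq_getElem (xs.zip ys) (0, 0) h0 (by omega)]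
    simp [List.getElem_zip]
  rw [hcongr,
      PySem.List.foldl_pyRange_zero_pyGetD' (xs.zip ys) (0, 0)
        (fun a (p : Int × Int) => if p.1 = v then a ++ [p.2] else a) acc,
      PySem.List.foldl_append_ite (p := fun p : Int × Int => p.1 = v) (f := fun p : Int × Int => p.2)]
  congr 1

-- B's grouping pass over enumerate equals the same fold over the zipped pairs.
lemma enumerate_fold_eq_zip_fold (xs ys : List Int) (h : xs.length ≤ ys.length) :
    (PySem.List.enumerate xs).foldl
      (fun d p => d.modify p.2 [] (· ++ [PySem.List.pyGetD ys p.1 0]))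
      (PySem.Dict.empty : PySem.Dict Int (List Int))
    = (xs.zip ys).foldl (fun d p => d.modify p.1 [] (· ++ [p.2])) PySem.Dict.empty := by
  have hmap : (PySem.List.enumerate xs).map
      (fun p => (p.2, PySem.List.pyGetD ys p.1 0)) = xs.zip ys := by
    apply List.ext_getElem
    · simp [PySem.List.length_enumerate, List.length_zip]; omega
    · intro k hk hk'
      have hkx : k < xs.length := by
        simpa [PySem.List.length_enumerate] using hk
      have hky : k < ys.length := by omega
      simp [PySem.List.getElem_enumerate, List.getElem_zip,
        List.getElem?_eq_getElem hky]
  rw [← hmap, List.foldl_map]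

theorem sortingHistograms_spec : Claim_equal_sortingHistograms := by
  intro xs ys _ hpre
  unfold Spec_sortingHistograms sortingHistograms sortingHistograms_alt Pre_sortingHistograms at *
  rw [enumerate_fold_eq_zip_fold xs ys hpre]
  have hg : ∀ w : Int,
      ((xs.zip ys).foldl (fun d p => d.modify p.1 [] (· ++ [p.2])) PySem.Dict.empty).getD w []
      = ((xs.zip ys).filter (fun p => p.1 == w)).map (·.2) := by
    intro w
    rw [PySem.Dict.getD_foldl_modify_append]
    simp
  have houter : (PySem.List.pyRange 0 ((PySem.List.sorted xs (fun v => v) false).length : Int) 1).foldl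
      (fun acc x =>
        (PySem.List.pyRange 0 (xs.length : Int) 1).foldl (fun acc2 y =>
          if PySem.List.pyGetD xs y 0 = PySem.List.pyGetD (PySem.List.sorted xs (fun v => v) false) x 0 then
            acc2 ++ [PySem.List.pyGetD ys y 0]
          else acc2) acc) []
      = (PySem.List.pyRange 0 ((PySem.List.sorted xs (fun v => v) false).length : Int) 1).foldl
      (fun acc x =>
        (fun a (w : Int) => a ++ ((xs.zip ys).filter (fun p => p.1 == w)).map (·.2)) acc
          (PySem.List.pyGetD (PySem.List.sorted xs (fun v => v) false) x 0)) [] := by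
    apply PySem.List.foldl_congr_mem
    intro a j _
    exact inner_loop_eq xs ys hpre _ a
  simp only [houter]
  rw [PySem.List.foldl_pyRange_zero_pyGetD' (PySem.List.sorted xs (fun v => v) false) 0
        (fun a (w : Int) => a ++ ((xs.zip ys).filter (fun p => p.1 == w)).map (·.2)) []]
  apply PySem.List.foldl_congr_mem
  intro a w _
  rw [hg]
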